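-- pv_equiv track=rewrite | github.com/Tunne-aly/base | word2vec/pbpbpb.py | get_skipgrams
-- ===== SOURCE A (Python) =====
-- def get_skipgrams(s, n):
--     for i in range(len(s)):
--         gram = ["" for j in range(2 * n)]
--         for j in range(1, n + 1):
--             if i - j >= 0:
--                 gram[n - j] = s[i - j]
--             if i + j < len(s):
--                 gram[n + j - 1] = s[i + j]
--         yield s[i], gram
-- ===== SOURCE B (Python) =====
-- def get_skipgrams(s, n):
--     n = max(n, 0)  # a non-positive window size means no context
--     for i in range(len(s)):
--         left = s[max(0, i - n):i]
--         left = [""] * (n - len(left)) + left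
--         right = s[i + 1:i + n + 1]
--         right = right + [""] * (n - len(right))
--         yield s[i], left + right
-- ===== Notes on version B (the rewrite author's own statement) =====
-- stated objective: faster
-- what changed: Replaces the pre-allocated 2n gram buffer filled by an index-arithmetic inner j-loop (with per-element bound checks) with direct slice-based construction of the padded left (s[max(0,i-n):i]) and right (s[i+1:i+n+1]) context halves, clamping a non-positive n to 0 once up front.
import Mathlib
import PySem

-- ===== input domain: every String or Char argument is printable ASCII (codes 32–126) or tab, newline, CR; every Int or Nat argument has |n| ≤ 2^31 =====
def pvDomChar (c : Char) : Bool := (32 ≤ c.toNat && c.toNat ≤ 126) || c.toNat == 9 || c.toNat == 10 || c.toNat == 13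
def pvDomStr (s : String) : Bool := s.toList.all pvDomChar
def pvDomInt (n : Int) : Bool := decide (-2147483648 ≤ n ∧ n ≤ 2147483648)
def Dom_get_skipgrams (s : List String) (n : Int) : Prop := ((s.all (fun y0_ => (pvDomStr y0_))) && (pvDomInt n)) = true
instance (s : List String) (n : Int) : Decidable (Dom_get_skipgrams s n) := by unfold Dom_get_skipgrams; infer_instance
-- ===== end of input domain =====

-- B replaces A's pre-allocated 2n gram buffer filled by an index-arithmetic inner loop with
-- slice-based construction of the padded left/right context halves (objective: alternative).
-- A is a generator; equivalence is about the yielded sequence as a list.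

-- ===== PORT A =====
-- pySetD/pyGetD are exact here: each assignment/index is guarded in range by A's own tests.
def get_skipgrams (s : List String) (n : Int) : List (String × List String) :=
  (PySem.List.pyRange 0 (s.length : Int) 1).map (fun i =>
    let gram0 := (PySem.List.pyRange 0 (2 * n) 1).map (fun _ => "")
    let gram := (PySem.List.pyRange 1 (n + 1) 1).foldl (fun g j =>
      let g := if 0 ≤ i - j then PySem.List.pySetD g (n - j) (PySem.List.pyGetD s (i - j) "") else g
      if i + j < (s.length : Int) then PySem.List.pySetD g (n + j - 1) (PySem.List.pyGetD s (i + j) "") else g) gram0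
    (PySem.List.pyGetD s i "", gram))

-- ===== PORT B =====
def get_skipgrams_alt (s : List String) (n : Int) : List (String × List String) :=
  let m := max n 0
  (PySem.List.pyRange 0 (s.length : Int) 1).map (fun i =>
    let left0 := PySem.List.slice s (some (max 0 (i - m))) (some i)
    let left := List.replicate (m - (left0.length : Int)).toNat "" ++ left0
    let right0 := PySem.List.slice s (some (i + 1)) (some (i + m + 1))
    let right := right0 ++ List.replicate (m - (right0.length : Int)).toNat ""
    (PySem.List.pyGetD s i "", left ++ right))

-- ===== PRECONDITION & SPEC =====
def Spec_get_skipgrams (s : List String) (n : Int) (out : List (String × List String)) : Prop := out = get_skipgrams_alt s n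
instance (s : List String) (n : Int) (out : List (String × List String)) : Decidable (Spec_get_skipgrams s n out) := by unfold Spec_get_skipgrams; infer_instance

-- ===== CLAIM (what is proved, stated in full; the proofs are below) =====
def Claim_equal_get_skipgrams : Prop := ∀ (s : List String) (n : Int), Dom_get_skipgrams s n → Spec_get_skipgrams s n (get_skipgrams s n)

-- ===== LEMMAS AND PROOFS =====

def pvLv (s : List String) (k j : Nat) : String := if j ≤ k then s.getD (k - j) "" else ""
def pvRv (s : List String) (k j : Nat) : String := if k + j < s.length then s.getD (k + j) "" else ""
def pvLvs (s : List String) (k m : Nat) : List String := (List.range m).map (fun t => pvLv s k (m - t))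
def pvRvs (s : List String) (k m : Nat) : List String := (List.range m).map (fun t => pvRv s k (t + 1))

theorem pvLvs_succ (s : List String) (k m : Nat) :
    pvLvs s k (m + 1) = pvLv s k (m + 1) :: pvLvs s k m := by
  simp [pvLvs, List.range_succ_eq_map, List.map_map, Function.comp]

theorem pvRvs_succ (s : List String) (k m : Nat) :
    pvRvs s k (m + 1) = pvRvs s k m ++ [pvRv s k (m + 1)] := by
  simp [pvRvs, List.range_succ]

theorem pv_length_Lvs (s : List String) (k m : Nat) : (pvLvs s k m).length = m := by simp [pvLvs]
theorem pv_length_Rvs (s : List String) (k m : Nat) : (pvRvs s k m).length = m := by simp [pvRvs]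

theorem pv_set_at (l1 l2 : List String) (x v : String) (i : Nat) (h : i = l1.length) :
    (l1 ++ x :: l2).set i v = l1 ++ v :: l2 := by
  subst h; rw [List.set_append]; simp

theorem pv_fold_inv (s : List String) (k N : Nat) :
    ∀ m, m ≤ N →
    (PySem.List.pyRange 1 ((m : Int) + 1) 1).foldl (fun g j =>
      let g := if 0 ≤ (k : Int) - j then PySem.List.pySetD g ((N : Int) - j) (PySem.List.pyGetD s ((k : Int) - j) "") else g
      if (k : Int) + j < (s.length : Int) then PySem.List.pySetD g ((N : Int) + j - 1) (PySem.List.pyGetD s ((k : Int) + j) "") else g)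
      (List.replicate (2 * N) "")
    = List.replicate (N - m) "" ++ pvLvs s k m ++ (pvRvs s k m ++ List.replicate (N - m) "") := by
  intro m
  induction m with
  | zero =>
    intro _
    rw [PySem.List.pyRange_one_eq_nil (by omega)]
    have : 2 * N = N + N := by omega
    rw [this, List.replicate_add]
    simp [pvLvs, pvRvs]
  | succ m ih =>
    intro hm
    have hmN : m < N := hm
    have h1 : ((m + 1 : Nat) : Int) + 1 = ((m : Int) + 1) + 1 := by push_cast; ring
    rw [h1, PySem.List.pyRange_one_succ_right (by omega), List.foldl_append, ih (by omega)]
    simp only [List.foldl_cons, List.foldl_nil]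
    -- step at j = m+1
    have hidx1 : (N : Int) - ((m : Int) + 1) = ((N - (m + 1) : Nat) : Int) := by omega
    have hidx2 : (N : Int) + ((m : Int) + 1) - 1 = ((N + m : Nat) : Int) := by omega
    have hrep : N - m = (N - (m + 1)) + 1 := by omega
    -- first conditional set produces uniformly the pvLv value
    have step1 :
        (if 0 ≤ (k : Int) - ((m : Int) + 1) then
          PySem.List.pySetD (List.replicate (N - m) "" ++ pvLvs s k m ++ (pvRvs s k m ++ List.replicate (N - m) ""))
            ((N : Int) - ((m : Int) + 1)) (PySem.List.pyGetD s ((k : Int) - ((m : Int) + 1)) "")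
         else List.replicate (N - m) "" ++ pvLvs s k m ++ (pvRvs s k m ++ List.replicate (N - m) ""))
        = List.replicate (N - (m + 1)) "" ++ (pvLv s k (m + 1) :: (pvLvs s k m ++ (pvRvs s k m ++ List.replicate (N - m) ""))) := by
      by_cases hg : 0 ≤ (k : Int) - ((m : Int) + 1)
      · have hkm : m + 1 ≤ k := by omega
        have hv : PySem.List.pyGetD s ((k : Int) - ((m : Int) + 1)) "" = pvLv s k (m + 1) := by
          have : (k : Int) - ((m : Int) + 1) = ((k - (m + 1) : Nat) : Int) := by omega
          rw [this, PySem.List.pyGetD_natCast, pvLv, if_pos hkm]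
        rw [if_pos hg, hidx1, PySem.List.pySetD_natCast, hv]
        rw [hrep, List.replicate_succ', List.append_assoc, List.append_assoc, List.singleton_append]
        rw [pv_set_at _ _ _ _ _ (by simp)]
      · have hkm : ¬ (m + 1 ≤ k) := by omega
        rw [if_neg hg, pvLv, if_neg hkm]
        rw [hrep, List.replicate_succ', List.append_assoc, List.append_assoc, List.singleton_append]
    rw [step1]
    -- second conditional set
    have step2 :
        (if (k : Int) + ((m : Int) + 1) < (s.length : Int) then
          PySem.List.pySetD (List.replicate (N - (m + 1)) "" ++ (pvLv s k (m + 1) :: (pvLvs s k m ++ (pvRvs s k m ++ List.replicate (N - m) ""))))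
            ((N : Int) + ((m : Int) + 1) - 1) (PySem.List.pyGetD s ((k : Int) + ((m : Int) + 1)) "")
         else List.replicate (N - (m + 1)) "" ++ (pvLv s k (m + 1) :: (pvLvs s k m ++ (pvRvs s k m ++ List.replicate (N - m) ""))))
        = List.replicate (N - (m + 1)) "" ++ (pvLv s k (m + 1) :: (pvLvs s k m ++ (pvRvs s k m ++ (pvRv s k (m + 1) :: List.replicate (N - (m + 1)) "")))) := by
      have hshape :
          List.replicate (N - (m + 1)) "" ++ (pvLv s k (m + 1) :: (pvLvs s k m ++ (pvRvs s k m ++ List.replicate (N - m) "")))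
          = (List.replicate (N - (m + 1)) "" ++ (pvLv s k (m + 1) :: (pvLvs s k m ++ pvRvs s k m))) ++ ("" :: List.replicate (N - (m + 1)) "") := by
        rw [hrep, List.replicate_succ]
        simp [List.append_assoc]
      by_cases hg : (k : Int) + ((m : Int) + 1) < (s.length : Int)
      · have hkm : k + (m + 1) < s.length := by omega
        have hv : PySem.List.pyGetD s ((k : Int) + ((m : Int) + 1)) "" = pvRv s k (m + 1) := by
          have : (k : Int) + ((m : Int) + 1) = ((k + (m + 1) : Nat) : Int) := by omega
          rw [this, PySem.List.pyGetD_natCast, pvRv, if_pos hkm]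
        rw [if_pos hg, hidx2, PySem.List.pySetD_natCast, hv, hshape]
        rw [pv_set_at _ _ _ _ _ (by simp [pv_length_Lvs, pv_length_Rvs]; omega)]
        simp [List.append_assoc]
      · have hkm : ¬ (k + (m + 1) < s.length) := by omega
        rw [if_neg hg, pvRv, if_neg hkm, hshape]
        simp [List.append_assoc]
    rw [step2, pvLvs_succ, pvRvs_succ]
    simp [List.append_assoc]

theorem pv_gramA (s : List String) (k : Nat) (N : Nat) :
    (PySem.List.pyRange 1 ((N : Int) + 1) 1).foldl (fun g j =>
      let g := if 0 ≤ (k : Int) - j then PySem.List.pySetD g ((N : Int) - j) (PySem.List.pyGetD s ((k : Int) - j) "") else g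
      if (k : Int) + j < (s.length : Int) then PySem.List.pySetD g ((N : Int) + j - 1) (PySem.List.pyGetD s ((k : Int) + j) "") else g)
      ((PySem.List.pyRange 0 (2 * (N : Int)) 1).map (fun _ => ""))
    = pvLvs s k N ++ pvRvs s k N := by
  have h0 : (PySem.List.pyRange 0 (2 * (N : Int)) 1).map (fun _ => ("" : String)) = List.replicate (2 * N) "" := by
    rw [List.eq_replicate_iff]
    constructor
    · rw [List.length_map, PySem.List.length_pyRange_one]; omega
    · intro b hb; simp at hb; exact hb.2
  rw [h0]
  have := pv_fold_inv s k N N le_rfl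
  simpa using this

theorem pv_leftB (s : List String) (k N : Nat) (hk : k < s.length) :
    List.replicate (((N : Int) - ((PySem.List.slice s (some (max 0 ((k : Int) - (N : Int)))) (some (k : Int))).length : Int)).toNat) ""
      ++ PySem.List.slice s (some (max 0 ((k : Int) - (N : Int)))) (some (k : Int))
    = pvLvs s k N := by
  by_cases hkN : N ≤ k
  · have hmax : max 0 ((k : Int) - (N : Int)) = ((k - N : Nat) : Int) := by omega
    rw [hmax, PySem.List.slice_natCast]
    have h1 : k - (k - N) = N := by omega
    rw [h1]
    have hlen : ((s.drop (k - N)).take N).length = N := by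
      simp; omega
    rw [hlen]
    simp only [sub_self, Int.toNat_zero, List.replicate_zero, List.nil_append]
    apply List.ext_getElem
    · rw [hlen, pv_length_Lvs]
    · intro t h1' h2'
      rw [hlen] at h1'
      rw [pv_length_Lvs] at h2'
      simp only [List.getElem_take, List.getElem_drop, pvLvs, List.getElem_map, List.getElem_range]
      rw [pvLv, if_pos (by omega)]
      rw [List.getD_eq_getElem _ _ (by omega)]
      congr 1
      omega
  · have hmax : max 0 ((k : Int) - (N : Int)) = ((0 : Nat) : Int) := by omega
    rw [hmax, PySem.List.slice_natCast]
    simp only [List.drop_zero, Nat.sub_zero]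
    have hlen : (s.take k).length = k := by simp; omega
    rw [hlen]
    have hpad : (((N : Int) - (k : Int))).toNat = N - k := by omega
    rw [hpad]
    apply List.ext_getElem
    · simp [pv_length_Lvs]; omega
    · intro t h1' h2'
      rw [pv_length_Lvs] at h2'
      rw [List.getElem_append]
      simp only [pvLvs, List.getElem_map, List.getElem_range, List.length_replicate]
      split
      · rw [List.getElem_replicate, pvLv, if_neg (by omega)]
      · rw [List.getElem_take, pvLv, if_pos (by omega)]
        rw [List.getD_eq_getElem _ _ (by omega)]
        congr 1
        omega

theorem pv_rightB (s : List String) (k N : Nat) (hk : k < s.length) :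
    PySem.List.slice s (some ((k : Int) + 1)) (some ((k : Int) + (N : Int) + 1))
      ++ List.replicate (((N : Int) - ((PySem.List.slice s (some ((k : Int) + 1)) (some ((k : Int) + (N : Int) + 1))).length : Int)).toNat) ""
    = pvRvs s k N := by
  have h1 : ((k : Int) + 1) = ((k + 1 : Nat) : Int) := by omega
  have h2 : ((k : Int) + (N : Int) + 1) = ((k + 1 + N : Nat) : Int) := by omega
  rw [h1, h2, PySem.List.slice_natCast]
  have h3 : k + 1 + N - (k + 1) = N := by omega
  rw [h3]
  have hlen : ((s.drop (k + 1)).take N).length = min N (s.length - (k + 1)) := by simp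
  rw [hlen]
  have hpad : (((N : Int) - ((min N (s.length - (k + 1)) : Nat) : Int))).toNat = N - min N (s.length - (k + 1)) := by omega
  rw [hpad]
  apply List.ext_getElem
  · simp [pv_length_Rvs]
  · intro t h1' h2'
    rw [pv_length_Rvs] at h2'
    rw [List.getElem_append]
    simp only [pvRvs, List.getElem_map, List.getElem_range, hlen]
    split
    · rw [List.getElem_take, List.getElem_drop, pvRv, if_pos (by omega)]
      rw [List.getD_eq_getElem _ _ (by omega)]
      congr 1
      omega
    · rw [List.getElem_replicate, pvRv, if_neg (by omega)]

-- ===== VERDICT (by name: the statement is the Claim_ definition above) =====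
theorem get_skipgrams_spec : Claim_equal_get_skipgrams := by
  intro s n _
  unfold Spec_get_skipgrams get_skipgrams get_skipgrams_alt
  dsimp only []
  apply List.map_congr_left
  intro i hi
  rw [PySem.List.mem_pyRange_one] at hi
  obtain ⟨hi0, hiL⟩ := hi
  have hik : i = ((i.toNat : Nat) : Int) := by omega
  have hkL : i.toNat < s.length := by omega
  rw [hik]
  by_cases hn : 0 ≤ n
  · have hmax : max n 0 = ((n.toNat : Nat) : Int) := by omega
    have hN : n = ((n.toNat : Nat) : Int) := by omega
    rw [hmax, hN, pv_gramA s i.toNat n.toNat]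
    simp only [Int.toNat_natCast]
    rw [pv_leftB s i.toNat n.toNat hkL, pv_rightB s i.toNat n.toNat hkL]
  · have hmax : max n 0 = ((0 : Nat) : Int) := by omega
    rw [hmax, pv_leftB s i.toNat 0 hkL, pv_rightB s i.toNat 0 hkL]
    rw [PySem.List.pyRange_one_eq_nil (show (n : Int) + 1 ≤ 1 by omega)]
    rw [PySem.List.pyRange_one_eq_nil (show 2 * n ≤ 0 by omega)]
    simp [pvLvs, pvRvs]
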